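-- pv_equiv track=rewrite | github.com/Asnanp/VoxPhysica | scripts/ensemble_height_checkpoints.py | _common_speakers
-- ===== SOURCE A (Python) =====
-- from typing import Any, Dict, List, Mapping, Sequence, Tuple
--
-- def _common_speakers(
--     by_checkpoint: Mapping[str, Mapping[str, Mapping[str, Any]]]
-- ) -> List[str]:
--     common = None
--     for records in by_checkpoint.values():
--         keys = set(records.keys())
--         common = keys if common is None else common & keys
--     return sorted(common or [])
-- ===== SOURCE B (Python) =====
-- from typing import Any, Dict, List, Mapping, Sequence, Tuple
--
-- def _common_speakers(
--     by_checkpoint: Mapping[str, Mapping[str, Mapping[str, Any]]]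
-- ) -> List[str]:
--     n = len(by_checkpoint)
--     counts: Dict[str, int] = {}
--     for records in by_checkpoint.values():
--         for key in records.keys():
--             counts[key] = counts.get(key, 0) + 1
--     return sorted(k for k, c in counts.items() if c == n)
-- ===== Notes on version B (the rewrite author's own statement) =====
-- stated objective: alternative
-- what changed: replaces the running set-intersection fold with a single counting pass over a frequency dict followed by a filter for keys whose count equals the number of checkpoints, then sort
import Mathlib
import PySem

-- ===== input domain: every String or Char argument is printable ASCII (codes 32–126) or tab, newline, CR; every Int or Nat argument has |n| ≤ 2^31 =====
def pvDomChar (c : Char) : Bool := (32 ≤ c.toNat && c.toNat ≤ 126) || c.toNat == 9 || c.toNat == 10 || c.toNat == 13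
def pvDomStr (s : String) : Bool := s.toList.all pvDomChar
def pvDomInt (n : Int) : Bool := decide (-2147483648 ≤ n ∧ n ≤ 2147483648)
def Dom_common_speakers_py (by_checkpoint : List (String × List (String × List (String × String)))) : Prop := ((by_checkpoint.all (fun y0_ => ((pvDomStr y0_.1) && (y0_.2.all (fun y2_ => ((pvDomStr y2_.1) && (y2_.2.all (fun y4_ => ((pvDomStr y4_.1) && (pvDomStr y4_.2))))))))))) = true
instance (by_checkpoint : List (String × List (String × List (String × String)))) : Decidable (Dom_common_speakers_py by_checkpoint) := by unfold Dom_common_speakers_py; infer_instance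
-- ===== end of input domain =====

-- B replaces A's running set-intersection fold with one counting pass over a frequency dict and a count == n filter (alternative decomposition, same result).

-- ===== PORT A =====
-- common = None; for records in by_checkpoint.values(): keys = set(records.keys()); common = keys if common is None else common & keys; return sorted(common or [])
def common_speakers_py (by_checkpoint : List (String × List (String × List (String × String)))) : List String :=
  let common : Option (PySem.Set String) :=
    by_checkpoint.foldl
      (fun acc entry =>
        let keys : PySem.Set String := PySem.Set.ofList (entry.2.map Prod.fst)
        match acc with
        | none => some keys
        | some c => some (PySem.Set.inter c keys))
      none
  PySem.List.sorted (common.getD PySem.Set.empty) (fun x => x) false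

-- ===== PORT B =====
-- n = len(by_checkpoint); counts = {}; for records in …values(): for key in records.keys(): counts[key] = counts.get(key, 0) + 1; return sorted(k for k, c in counts.items() if c == n)
def common_speakers_py_alt (by_checkpoint : List (String × List (String × List (String × String)))) : List String :=
  let n : Int := by_checkpoint.length
  let counts : PySem.Dict String Int :=
    by_checkpoint.foldl
      (fun d entry =>
        (PySem.List.dedup (entry.2.map Prod.fst)).foldl
          (fun d key => d.insert key (d.getD key 0 + 1)) d)
      PySem.Dict.empty
  PySem.List.sorted ((counts.items.filter (fun p => p.2 == n)).map Prod.fst) (fun x => x) false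

-- ===== PRECONDITION & SPEC =====
def Spec_common_speakers_py (by_checkpoint : List (String × List (String × List (String × String)))) (out : List String) : Prop := out = common_speakers_py_alt by_checkpoint
instance (by_checkpoint : List (String × List (String × List (String × String)))) (out : List String) : Decidable (Spec_common_speakers_py by_checkpoint out) := by unfold Spec_common_speakers_py; infer_instance

-- ===== CLAIM (what is proved, stated in full; the proofs are below) =====
def Claim_equal_common_speakers_py : Prop := ∀ (by_checkpoint : List (String × List (String × List (String × String)))), Dom_common_speakers_py by_checkpoint → Spec_common_speakers_py by_checkpoint (common_speakers_py by_checkpoint)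

-- ===== LEMMAS AND PROOFS =====

def keysOf (e : String × List (String × List (String × String))) : List String :=
  PySem.List.dedup (e.2.map Prod.fst)

-- A-side running intersection
lemma mem_interFold (bc : List (String × List (String × List (String × String))))
    (s : PySem.Set String) (x : String) :
    x ∈ bc.foldl (fun c e => PySem.Set.inter c (PySem.Set.ofList (e.2.map Prod.fst))) s ↔
      x ∈ s ∧ ∀ e ∈ bc, x ∈ e.2.map Prod.fst := by
  induction bc generalizing s with
  | nil => simp
  | cons e rest ih =>
      simp [List.foldl_cons, ih, PySem.Set.mem_inter, PySem.Set.mem_ofList]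
      tauto

lemma nodup_interFold (bc : List (String × List (String × List (String × String))))
    (s : PySem.Set String) (hs : s.Nodup) :
    (bc.foldl (fun c e => PySem.Set.inter c (PySem.Set.ofList (e.2.map Prod.fst))) s).Nodup := by
  induction bc generalizing s with
  | nil => exact hs
  | cons e rest ih => exact ih _ (PySem.Set.nodup_inter _ _ hs)

lemma foldl_some (bc : List (String × List (String × List (String × String))))
    (s : PySem.Set String) :
    bc.foldl (fun (acc : Option (PySem.Set String)) e =>
        let keys := PySem.Set.ofList (e.2.map Prod.fst)
        match acc with
        | none => some keys
        | some c => some (PySem.Set.inter c keys)) (some s)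
      = some (bc.foldl (fun c e => PySem.Set.inter c (PySem.Set.ofList (e.2.map Prod.fst))) s) := by
  induction bc generalizing s with
  | nil => rfl
  | cons e rest ih => simpa using ih _

-- B-side counting
def cstep (d : PySem.Dict String Int) (e : String × List (String × List (String × String))) :
    PySem.Dict String Int :=
  (keysOf e).foldl (fun d key => d.insert key (d.getD key 0 + 1)) d

lemma getD_cfold (bc : List (String × List (String × List (String × String))))
    (d : PySem.Dict String Int) (k : String) :
    (bc.foldl cstep d).getD k 0 = d.getD k 0 + (bc.countP (fun e => decide (k ∈ keysOf e)) : Int) := by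
  induction bc generalizing d with
  | nil => simp
  | cons e rest ih =>
      rw [List.foldl_cons, ih, List.countP_cons]
      have h1 : (cstep d e).getD k 0 = d.getD k 0 + ((keysOf e).count k : Int) := by
        simpa using PySem.Dict.getD_foldl_insert_add_one (keysOf e) d k
      have h2 : (keysOf e).count k = if k ∈ keysOf e then 1 else 0 := by
        rcases Classical.em (k ∈ keysOf e) with h | h
        · rw [if_pos h]
          exact List.count_eq_one_of_mem (PySem.List.nodup_dedup _) h
        · rw [if_neg h, List.count_eq_zero]; exact h
      rw [h1, h2]
      split_ifs with h h2b h2b <;> simp_all <;> omega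
  
lemma mem_keys_cfold (bc : List (String × List (String × List (String × String))))
    (d : PySem.Dict String Int) (k : String) :
    k ∈ (bc.foldl cstep d).keys ↔ k ∈ d.keys ∨ ∃ e ∈ bc, k ∈ keysOf e := by
  induction bc generalizing d with
  | nil => simp
  | cons e rest ih =>
      rw [List.foldl_cons, ih]
      have : (cstep d e).keys = PySem.Set.update d.keys (keysOf e) :=
        PySem.Dict.keys_foldl_insert _ _ _
      rw [this]
      simp [PySem.Set.mem_update]
      tauto

lemma nodup_keys_cfold (bc : List (String × List (String × List (String × String))))
    (d : PySem.Dict String Int) (h : d.keys.Nodup) : (bc.foldl cstep d).keys.Nodup := by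
  induction bc generalizing d with
  | nil => exact h
  | cons e rest ih => exact ih _ (PySem.Dict.nodup_keys_foldl_insert _ _ _ h)

theorem ab_main (bc : List (String × List (String × List (String × String)))) : common_speakers_py bc = common_speakers_py_alt bc := by
  cases bc with
  | nil => rfl
  | cons e rest =>
    let bc := e :: rest
    show common_speakers_py bc = common_speakers_py_alt bc
    have hbc : bc = e :: rest := rfl
    -- B side
    have hcounts : bc.foldl
        (fun d entry =>
          (PySem.List.dedup (entry.2.map Prod.fst)).foldl
            (fun d key => d.insert key (d.getD key 0 + 1)) d)
        PySem.Dict.empty = bc.foldl cstep PySem.Dict.empty := rfl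
    set counts := bc.foldl cstep PySem.Dict.empty with hc
    have hnd : counts.keys.Nodup := nodup_keys_cfold bc _ (by simp)
    have hitems : counts.items = counts.keys.map (fun k => (k, counts.getD k 0)) :=
      PySem.Dict.items_eq_map_keys counts hnd 0
    have hLB : (counts.items.filter (fun p => p.2 == (bc.length : Int))).map Prod.fst
        = counts.keys.filter (fun k => counts.getD k 0 == (bc.length : Int)) := by
      rw [hitems, List.filter_map, List.map_map]
      simp [Function.comp_def]
    -- A side
    have hA : common_speakers_py bc = PySem.List.sorted
        (rest.foldl (fun c e => PySem.Set.inter c (PySem.Set.ofList (e.2.map Prod.fst)))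
          (PySem.Set.ofList (e.2.map Prod.fst))) (fun x => x) false := by
      show PySem.List.sorted (Option.getD _ _) _ _ = _
      rw [hbc, List.foldl_cons, foldl_some]
      rfl
    set LA := rest.foldl (fun c e => PySem.Set.inter c (PySem.Set.ofList (e.2.map Prod.fst)))
          (PySem.Set.ofList (e.2.map Prod.fst)) with hLAdef
    set LB := counts.keys.filter (fun k => counts.getD k 0 == (bc.length : Int)) with hLBdef
    -- memberships
    have hmemA : ∀ x, x ∈ LA ↔ ∀ e' ∈ bc, x ∈ e'.2.map Prod.fst := by
      intro x
      rw [hLAdef, mem_interFold, PySem.Set.mem_ofList, hbc]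
      simp
    have hmemB : ∀ x, x ∈ LB ↔ ∀ e' ∈ bc, x ∈ e'.2.map Prod.fst := by
      intro x
      rw [hLBdef, List.mem_filter]
      constructor
      · rintro ⟨-, hcnt⟩
        have := getD_cfold bc PySem.Dict.empty x
        rw [hc] at hcnt
        rw [this] at hcnt
        simp only [PySem.Dict.getD_empty, zero_add, beq_iff_eq, Int.natCast_inj] at hcnt
        have hall := (List.countP_eq_length (p := fun e => decide (x ∈ keysOf e)) (l := bc)).mp hcnt
        intro e' he'
        have := hall e' he'
        simp only [decide_eq_true_eq, keysOf, PySem.List.mem_dedup] at this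
        exact this
      · intro hall
        have hcnt : bc.countP (fun e => decide (x ∈ keysOf e)) = bc.length := by
          rw [List.countP_eq_length]
          intro e' he'
          simp only [decide_eq_true_eq, keysOf, PySem.List.mem_dedup]
          exact hall e' he'
        refine ⟨?_, ?_⟩
        · rw [(mem_keys_cfold bc PySem.Dict.empty x)]
          right
          refine ⟨e, by simp [hbc], ?_⟩
          simp only [keysOf, PySem.List.mem_dedup]
          have := hall e (by simp [hbc])
          simpa using this
        · rw [hc, getD_cfold bc PySem.Dict.empty x, hcnt]
          simp
    have hperm : LA.Perm LB := by
      rw [List.perm_ext_iff_of_nodup (nodup_interFold _ _ (PySem.Set.nodup_ofList _)) (List.Nodup.filter _ hnd)]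
      intro x; rw [hmemA x, hmemB x]
    have : common_speakers_py_alt bc = PySem.List.sorted LB (fun x => x) false := by
      show PySem.List.sorted _ _ _ = _
      rw [hcounts, hLB]
    rw [hA, this]
    exact PySem.List.sorted_eq_sorted_of_perm LA LB _ (fun a b h => h) hperm

-- ===== VERDICT (by name: the statement is the Claim_ definition above) =====
theorem common_speakers_py_spec : Claim_equal_common_speakers_py := by
  intro bc _
  unfold Spec_common_speakers_py
  exact ab_main bc
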